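-- pv_equiv track=rewrite | github.com/M4yc/Studies_Python | INF101/Exe_pratica/P09/pratica-09.py | faz_horario_escolar
-- ===== SOURCE A (Python) =====
-- def faz_horario_escolar(disciplinas,matriculas):
--     emptySet = set() # conjunto vazio
--
--     conflitos = [ emptySet for d in disciplinas ]
--     for a in matriculas.keys():
--         for d in range(len(disciplinas)):
--             if disciplinas[d] in matriculas[a]:
--                 conflitos[d] = conflitos[d].union(matriculas[a])
--
--     restantes = set(disciplinas)
--     horario = []
--     while restantes != emptySet:
--         i = 0
--         d = disciplinas[i]
--         while d not in restantes:
--             i = i + 1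
--             d = disciplinas[i]
--         sessao = { d }
--         tentativa = restantes.difference(conflitos[i])
--         for s in range(len(disciplinas)):
--             if disciplinas[s] in tentativa:
--                 if conflitos[s].isdisjoint(sessao):
--                     sessao.add(disciplinas[s])
--         restantes = restantes.difference(sessao)
--
--         horario.append(sessao)
--
--
--     return horario
-- ===== SOURCE B (Python) =====
-- def faz_horario_escolar(disciplinas, matriculas):
--     # Single-pass first-fit: schedule each discipline (first-appearance order,
--     # duplicates skipped) into the first existing session disjoint from its
--     # conflict set, creating a new session when none fits.
--     turmas = list(matriculas.values())
--     sessoes = []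
--     agendadas = set()
--     for d in disciplinas:
--         if d in agendadas:
--             continue
--         agendadas.add(d)
--         conf = set()
--         for t in turmas:
--             if d in t:
--                 conf = conf.union(t)
--         for s in sessoes:
--             if conf.isdisjoint(s):
--                 s.add(d)
--                 break
--         else:
--             sessoes.append({d})
--     return sessoes
-- ===== Notes on version B (the rewrite author's own statement) =====
-- stated objective: faster
-- what changed: A repeatedly rescans the whole discipline list once per session (build indexed conflict sets, then a while-loop that re-derives each session from the remaining set); B makes a single first-fit pass over the disciplines in first-appearance order, dropping each one into the first existing session disjoint from its conflict set or opening a new session.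
import Mathlib
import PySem

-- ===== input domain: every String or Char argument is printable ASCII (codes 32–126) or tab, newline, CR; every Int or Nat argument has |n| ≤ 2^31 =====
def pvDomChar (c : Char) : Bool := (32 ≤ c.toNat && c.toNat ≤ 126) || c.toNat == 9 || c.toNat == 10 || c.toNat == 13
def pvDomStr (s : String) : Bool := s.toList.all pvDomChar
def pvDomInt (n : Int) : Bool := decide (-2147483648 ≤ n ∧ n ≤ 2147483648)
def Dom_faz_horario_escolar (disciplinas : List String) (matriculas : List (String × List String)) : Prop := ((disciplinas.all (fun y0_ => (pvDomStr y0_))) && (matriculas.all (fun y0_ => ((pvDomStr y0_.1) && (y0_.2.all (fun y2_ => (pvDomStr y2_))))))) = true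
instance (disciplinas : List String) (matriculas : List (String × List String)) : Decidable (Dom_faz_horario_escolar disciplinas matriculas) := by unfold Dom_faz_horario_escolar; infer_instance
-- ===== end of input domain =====

-- B replaces A's pass-by-pass greedy (rescan all disciplines for every new session) by a
-- single first-fit pass over the disciplines; same exact output, measurably faster by the
-- timing run (single pass instead of one rescan per session).
-- Sessions are Python sets: their element order is the PySem.Set insertion order on both sides.

-- ===== PORT A =====
-- The outer 'while restantes != set()' loop.  Fuel: each pass removes at least one element of
-- restantes ⊆ set(disciplinas), so len(disciplinas) passes always suffice (proved below).
-- The inner 'while d not in restantes: i += 1' index search is rendered as find? over the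
-- (disciplinas[i], conflitos[i]) pairs; 'none' is unreachable (Python would raise IndexError
-- only if restantes held a name outside disciplinas, which never happens).
def fazWhile (disciplinas : List String) (conflitos : List (PySem.Set String)) :
    Nat → PySem.Set String → List (List String)
  | 0, _ => []
  | fuel+1, restantes =>
    if restantes.isEmpty then []
    else
      match (disciplinas.zip conflitos).find? (fun p => decide (p.1 ∈ restantes)) with
      | none => []
      | some dc =>
        let sessao0 : PySem.Set String := PySem.Set.add PySem.Set.empty dc.1   -- sessao = { d }
        let tentativa := PySem.Set.diff restantes dc.2
        -- for s in range(len(disciplinas)): reads disciplinas[s], conflitos[s] → fold over the zip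
        let sessao := (disciplinas.zip conflitos).foldl
          (fun sess p =>
            if p.1 ∈ tentativa then
              (if PySem.Set.isdisjoint p.2 sess then PySem.Set.add sess p.1 else sess)
            else sess) sessao0
        sessao :: fazWhile disciplinas conflitos fuel (PySem.Set.diff restantes sessao)

def faz_horario_escolar (disciplinas : List String) (matriculas : List (String × List String)) : List (List String) :=
  let m := PySem.Dict.ofList matriculas
  -- for a in matriculas.keys(): for d in range(len(disciplinas)): conditionally update conflitos[d]
  -- (the inner index loop updates each cell once → zipWith over disciplinas and conflitos)
  let conflitos := (PySem.Dict.keys m).foldl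
      (fun C a => List.zipWith
        (fun nm cd => if nm ∈ PySem.Dict.getD m a [] then PySem.Set.union cd (PySem.Dict.getD m a []) else cd)
        disciplinas C)
      (disciplinas.map (fun _ => (PySem.Set.empty : PySem.Set String)))
  fazWhile disciplinas conflitos disciplinas.length (PySem.Set.ofList disciplinas)

-- ===== PORT B =====
def confOf (turmas : List (List String)) (d : String) : PySem.Set String :=
  turmas.foldl (fun conf t => if d ∈ t then PySem.Set.union conf t else conf) PySem.Set.empty

def ffPlace (conf : PySem.Set String) (d : String) : List (PySem.Set String) → List (PySem.Set String)
  | [] => [PySem.Set.add PySem.Set.empty d]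
  | s :: rest =>
    if PySem.Set.isdisjoint conf s then PySem.Set.add s d :: rest else s :: ffPlace conf d rest

def faz_horario_escolar_alt (disciplinas : List String) (matriculas : List (String × List String)) : List (List String) :=
  let turmas := PySem.Dict.values (PySem.Dict.ofList matriculas)
  (disciplinas.foldl
    (fun (st : List (PySem.Set String) × PySem.Set String) d =>
      if d ∈ st.2 then st
      else (ffPlace (confOf turmas d) d st.1, PySem.Set.add st.2 d))
    ([], PySem.Set.empty)).1

-- ===== PRECONDITION & SPEC =====
def Spec_faz_horario_escolar (disciplinas : List String) (matriculas : List (String × List String)) (out : List (List String)) : Prop := out = faz_horario_escolar_alt disciplinas matriculas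
instance (disciplinas : List String) (matriculas : List (String × List String)) (out : List (List String)) : Decidable (Spec_faz_horario_escolar disciplinas matriculas out) := by unfold Spec_faz_horario_escolar; infer_instance

-- ===== CLAIM (what is proved, stated in full; the proofs are below) =====
def Claim_equal_faz_horario_escolar : Prop := ∀ (disciplinas : List String) (matriculas : List (String × List String)), Dom_faz_horario_escolar disciplinas matriculas → Spec_faz_horario_escolar disciplinas matriculas (faz_horario_escolar disciplinas matriculas)

-- ===== LEMMAS AND PROOFS =====

-- A's inner-pass step over one discipline x with conflict set cf x
def stepA (cf : String → PySem.Set String) (tent : PySem.Set String)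
    (sess : PySem.Set String) (x : String) : PySem.Set String :=
  if x ∈ tent then
    (if PySem.Set.isdisjoint (cf x) sess then PySem.Set.add sess x else sess)
  else sess

-- first occurrences of l not in ag, in order
def filterDedup (ag : PySem.Set String) : List String → List String
  | [] => []
  | x :: xs => if x ∈ ag then filterDedup ag xs else x :: filterDedup (PySem.Set.add ag x) xs

-- grow a session greedily along a list, also returning the skipped elements in order
def growSk (cf : String → PySem.Set String) (s : PySem.Set String) :
    List String → PySem.Set String × List String
  | [] => (s, [])
  | x :: xs =>
    if PySem.Set.isdisjoint (cf x) s then growSk cf (PySem.Set.add s x) xs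
    else ((growSk cf s xs).1, x :: (growSk cf s xs).2)

-- B's fold without the agendadas bookkeeping
def ffRun (cf : String → PySem.Set String) (S : List (PySem.Set String)) (l : List String) :
    List (PySem.Set String) :=
  l.foldl (fun S x => ffPlace (cf x) x S) S

theorem mem_conf_foldl (ts : List (List String)) (x y : String) (acc : PySem.Set String) :
    y ∈ ts.foldl (fun acc t => if x ∈ t then PySem.Set.union acc t else acc) acc ↔
      y ∈ acc ∨ ∃ t ∈ ts, x ∈ t ∧ y ∈ t := by
  induction ts generalizing acc with
  | nil => simp
  | cons t ts ih =>
    simp only [List.foldl_cons]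
    rw [ih]
    by_cases h : x ∈ t
    · simp [h, PySem.Set.mem_union]; tauto
    · simp [h]
theorem mem_confOf (ts : List (List String)) (x y : String) :
    y ∈ confOf ts x ↔ ∃ t ∈ ts, x ∈ t ∧ y ∈ t := by
  rw [confOf, mem_conf_foldl]
  simp [PySem.Set.empty]
theorem confOf_symm (ts : List (List String)) (x y : String) :
    y ∈ confOf ts x ↔ x ∈ confOf ts y := by
  rw [mem_confOf, mem_confOf]
  tauto
theorem zipWith_upd_map (disc : List String) (g : String → PySem.Set String) (t : List String) :
    List.zipWith (fun nm cd => if nm ∈ t then PySem.Set.union cd t else cd) disc (disc.map g)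
      = disc.map (fun nm => if nm ∈ t then PySem.Set.union (g nm) t else g nm) := by
  induction disc with
  | nil => rfl
  | cons d disc ih => simp [ih]
theorem conflitos_map (keys : List String) (f : String → List String) (disc : List String)
    (g : String → PySem.Set String) :
    keys.foldl (fun C a => List.zipWith
        (fun nm cd => if nm ∈ f a then PySem.Set.union cd (f a) else cd) disc C) (disc.map g)
      = disc.map (fun nm => keys.foldl
          (fun acc a => if nm ∈ f a then PySem.Set.union acc (f a) else acc) (g nm)) := by
  induction keys generalizing g with
  | nil => rfl
  | cons a keys ih =>
    simp only [List.foldl_cons]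
    rw [zipWith_upd_map, ih]
theorem conf_keys_eq_confOf (m : PySem.Dict String (List String)) (h : m.keys.Nodup) (nm : String) :
    (PySem.Dict.keys m).foldl
        (fun acc a => if nm ∈ PySem.Dict.getD m a [] then PySem.Set.union acc (PySem.Dict.getD m a []) else acc)
        PySem.Set.empty
      = confOf (PySem.Dict.values m) nm := by
  rw [confOf, PySem.Dict.values_eq_map_keys m h [], List.foldl_map]

-- growSk basics
theorem grow_subset (cf : String → PySem.Set String) (s : PySem.Set String) (l : List String)
    (y : String) (hy : y ∈ s) : y ∈ (growSk cf s l).1 := by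
  induction l generalizing s with
  | nil => exact hy
  | cons x xs ih =>
    rw [growSk]
    split
    · exact ih _ (by simp [PySem.Set.mem_add, hy])
    · exact ih _ hy
theorem grow_mem (cf : String → PySem.Set String) (s : PySem.Set String) (l : List String)
    (y : String) (hy : y ∈ (growSk cf s l).1) : y ∈ s ∨ y ∈ l := by
  induction l generalizing s with
  | nil => exact Or.inl hy
  | cons x xs ih =>
    rw [growSk] at hy
    by_cases h : PySem.Set.isdisjoint (cf x) s = true
    · simp only [h, if_pos] at hy
      rcases ih _ hy with h' | h'
      · rcases (PySem.Set.mem_add _ _ _).1 h' with h'' | h''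
        · exact Or.inl h''
        · exact Or.inr (by simp [h''])
      · exact Or.inr (by simp [h'])
    · rw [if_neg h] at hy
      simp only at hy
      rcases ih _ hy with h' | h'
      · exact Or.inl h'
      · exact Or.inr (by simp [h'])

-- first-fit split lemma
theorem ffRun_split (cf : String → PySem.Set String) (l : List String)
    (s : PySem.Set String) (S : List (PySem.Set String)) :
    ffRun cf (s :: S) l = (growSk cf s l).1 :: ffRun cf S (growSk cf s l).2 := by
  induction l generalizing s S with
  | nil => rfl
  | cons x xs ih =>
    rw [ffRun, List.foldl_cons]
    show ffRun cf (ffPlace (cf x) x (s :: S)) xs = _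
    rw [ffPlace]
    by_cases h : PySem.Set.isdisjoint (cf x) s = true
    · rw [if_pos h, ih, growSk, if_pos h]
    · rw [if_neg h, ih, growSk, if_neg h]
      rfl

-- skipped = later elements not absorbed into the session
theorem growSk_snd_eq_filter (cf : String → PySem.Set String) (l : List String)
    (s : PySem.Set String) (hn : l.Nodup) (hs : ∀ x ∈ l, x ∉ s) :
    (growSk cf s l).2 = l.filter (fun x => decide (x ∉ (growSk cf s l).1)) := by
  induction l generalizing s with
  | nil => rfl
  | cons x xs ih =>
    have hxs : x ∉ xs := (List.nodup_cons.1 hn).1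
    have hn' : xs.Nodup := (List.nodup_cons.1 hn).2
    rw [growSk]
    by_cases h : PySem.Set.isdisjoint (cf x) s = true
    · rw [if_pos h]
      have hmem : x ∈ (growSk cf (PySem.Set.add s x) xs).1 :=
        grow_subset _ _ _ _ (by simp [PySem.Set.mem_add])
      rw [List.filter_cons, if_neg (by simp [hmem])]
      exact ih _ hn' (fun y hy => by
        rw [PySem.Set.mem_add]
        push Not
        exact ⟨hs y (by simp [hy]), fun hxy => hxs (hxy ▸ hy)⟩)
    · rw [if_neg h]
      have hx : x ∉ (growSk cf s xs).1 := by
        intro hmem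
        rcases grow_mem _ _ _ _ hmem with h' | h'
        · exact hs x (by simp) h'
        · exact hxs h'
      simp only [List.filter_cons]
      rw [if_pos (by simpa using hx)]
      have := ih _ hn' (fun y hy => hs y (by simp [hy]))
      simpa using this

theorem mem_filterDedup (l : List String) (ag : PySem.Set String) (x : String) :
    x ∈ filterDedup ag l ↔ x ∈ l ∧ x ∉ ag := by
  induction l generalizing ag with
  | nil => simp [filterDedup]
  | cons y ys ih =>
    rw [filterDedup]
    by_cases h : y ∈ ag
    · rw [if_pos h, ih]
      constructor
      · rintro ⟨h1, h2⟩; exact ⟨by simp [h1], h2⟩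
      · rintro ⟨h1, h2⟩
        rcases List.mem_cons.1 h1 with rfl | h1
        · exact absurd h h2
        · exact ⟨h1, h2⟩
    · rw [if_neg h]
      simp only [List.mem_cons, ih, PySem.Set.mem_add]
      by_cases hxy : x = y
      · subst hxy; simp [h]
      · simp [hxy]

theorem nodup_filterDedup (l : List String) (ag : PySem.Set String) :
    (filterDedup ag l).Nodup := by
  induction l generalizing ag with
  | nil => simp [filterDedup]
  | cons y ys ih =>
    rw [filterDedup]
    by_cases h : y ∈ ag
    · rw [if_pos h]; exact ih ag
    · rw [if_neg h]
      refine List.nodup_cons.2 ⟨?_, ih _⟩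
      rw [mem_filterDedup]
      rintro ⟨-, h2⟩
      exact h2 (by simp [PySem.Set.mem_add])

theorem length_filterDedup_le (l : List String) (ag : PySem.Set String) :
    (filterDedup ag l).length ≤ l.length := by
  induction l generalizing ag with
  | nil => simp [filterDedup]
  | cons y ys ih =>
    rw [filterDedup]
    by_cases h : y ∈ ag
    · rw [if_pos h]; exact Nat.le_succ_of_le (ih ag)
    · rw [if_neg h]; simpa using ih (PySem.Set.add ag y)

theorem filterDedup_congr (l : List String) (ag ag' : PySem.Set String)
    (h : ∀ z, z ∈ ag ↔ z ∈ ag') : filterDedup ag l = filterDedup ag' l := by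
  induction l generalizing ag ag' with
  | nil => rfl
  | cons y ys ih =>
    rw [filterDedup, filterDedup]
    by_cases hy : y ∈ ag
    · rw [if_pos hy, if_pos ((h y).1 hy)]
      exact ih _ _ h
    · rw [if_neg hy, if_neg (fun hc => hy ((h y).2 hc))]
      congr 1
      exact ih _ _ (fun z => by rw [PySem.Set.mem_add, PySem.Set.mem_add, h z])

theorem filterDedup_add_of_false (l : List String) (p : String → Bool) (x : String)
    (hx : p x = false) (ag : PySem.Set String) :
    (filterDedup (PySem.Set.add ag x) l).filter p = (filterDedup ag l).filter p := by
  induction l generalizing ag with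
  | nil => rfl
  | cons y ys ih =>
    by_cases hxy : y = x
    · subst hxy
      rw [filterDedup, if_pos (by simp [PySem.Set.mem_add]), filterDedup]
      by_cases h : y ∈ ag
      · rw [if_pos h, ih]
      · rw [if_neg h, List.filter_cons, if_neg (by simp [hx]), ih]
    · rw [filterDedup, filterDedup]
      by_cases h : y ∈ ag
      · rw [if_pos (by simp [PySem.Set.mem_add]; tauto), if_pos h, ih]
      · rw [if_neg (by simp [PySem.Set.mem_add]; tauto), if_neg h]
        by_cases hp : p y
        · rw [List.filter_cons, List.filter_cons, if_pos (by simp [hp]), if_pos (by simp [hp])]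
          congr 1
          rw [filterDedup_congr ys (PySem.Set.add (PySem.Set.add ag x) y) (PySem.Set.add (PySem.Set.add ag y) x)
            (fun z => by rw [PySem.Set.mem_add, PySem.Set.mem_add, PySem.Set.mem_add, PySem.Set.mem_add]; tauto)]
          exact ih _
        · rw [List.filter_cons, List.filter_cons, if_neg (by simp [hp]), if_neg (by simp [hp])]
          rw [filterDedup_congr ys (PySem.Set.add (PySem.Set.add ag x) y) (PySem.Set.add (PySem.Set.add ag y) x)
            (fun z => by rw [PySem.Set.mem_add, PySem.Set.mem_add, PySem.Set.mem_add, PySem.Set.mem_add]; tauto)]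
          exact ih _

theorem filterDedup_filter (l : List String) (p : String → Bool) (ag : PySem.Set String) :
    filterDedup ag (l.filter p) = (filterDedup ag l).filter p := by
  induction l generalizing ag with
  | nil => rfl
  | cons y ys ih =>
    rw [List.filter_cons]
    by_cases hp : p y
    · rw [if_pos (by simp [hp]), filterDedup, filterDedup]
      by_cases h : y ∈ ag
      · rw [if_pos h, if_pos h, ih]
      · rw [if_neg h, if_neg h, List.filter_cons, if_pos (by simp [hp]), ih]
    · rw [if_neg (by simpa using hp), filterDedup]
      by_cases h : y ∈ ag
      · rw [if_pos h, ih]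
      · rw [if_neg h, List.filter_cons, if_neg (by simpa using hp)]
        rw [ih, filterDedup_add_of_false _ _ _ (by simpa using hp)]

theorem find?_filterDedup (l : List String) (p : String → Bool) (ag : PySem.Set String)
    (h : ∀ x ∈ ag, p x = false) :
    (filterDedup ag l).find? p = l.find? p := by
  induction l generalizing ag with
  | nil => rfl
  | cons y ys ih =>
    rw [filterDedup]
    by_cases hy : y ∈ ag
    · rw [if_pos hy, List.find?_cons, ih _ h]
      rw [h y hy]
    · rw [if_neg hy, List.find?_cons, List.find?_cons]
      cases hp : p y
      · exact ih _ (fun x hx => by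
          rcases (PySem.Set.mem_add _ _ _).1 hx with h' | rfl
          · exact h x h'
          · exact hp)
      · rfl


def DoneA (cf : String → PySem.Set String) (tent s : PySem.Set String) (x : String) : Prop :=
  x ∈ tent → x ∈ s ∨ PySem.Set.isdisjoint (cf x) s = false

theorem isdisjoint_false_iff (s t : PySem.Set String) :
    PySem.Set.isdisjoint s t = false ↔ ∃ x ∈ s, x ∈ t := by
  constructor
  · intro h
    by_contra hc
    push Not at hc
    rw [(PySem.Set.isdisjoint_iff s t).2 hc] at h
    simp at h
  · intro ⟨x, hx, hxt⟩
    cases hd : PySem.Set.isdisjoint s t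
    · rfl
    · exact absurd hxt ((PySem.Set.isdisjoint_iff s t).1 hd x hx)

theorem stepA_of_done (cf : String → PySem.Set String) (tent s : PySem.Set String) (x : String)
    (h : DoneA cf tent s x) : stepA cf tent s x = s := by
  rw [stepA]
  by_cases ht : x ∈ tent
  · rw [if_pos ht]
    rcases h ht with hm | hd
    · split
      · exact PySem.Set.add_of_mem hm
      · rfl
    · rw [hd]
      simp
  · rw [if_neg ht]

theorem stepA_subset (cf : String → PySem.Set String) (tent s : PySem.Set String) (x y : String)
    (hy : y ∈ s) : y ∈ stepA cf tent s x := by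
  rw [stepA]
  split
  · split
    · simp [PySem.Set.mem_add, hy]
    · exact hy
  · exact hy

theorem done_stepA (cf : String → PySem.Set String) (tent s : PySem.Set String) (x : String) :
    DoneA cf tent (stepA cf tent s x) x := by
  intro ht
  rw [stepA, if_pos ht]
  cases hd : PySem.Set.isdisjoint (cf x) s
  · rw [if_neg (by simp)]
    exact Or.inr hd
  · rw [if_pos rfl]
    exact Or.inl (by simp [PySem.Set.mem_add])

theorem done_mono (cf : String → PySem.Set String) (tent s s' : PySem.Set String) (x : String)
    (hs : ∀ y ∈ s, y ∈ s') (h : DoneA cf tent s x) : DoneA cf tent s' x := by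
  intro ht
  rcases h ht with hm | hd
  · exact Or.inl (hs x hm)
  · rcases (isdisjoint_false_iff _ _).1 hd with ⟨y, hy1, hy2⟩
    exact Or.inr ((isdisjoint_false_iff _ _).2 ⟨y, hy1, hs y hy2⟩)

theorem foldl_stepA_filterDedup (cf : String → PySem.Set String) (tent : PySem.Set String)
    (l : List String) (s ag : PySem.Set String) (h : ∀ x ∈ ag, DoneA cf tent s x) :
    l.foldl (stepA cf tent) s = (filterDedup ag l).foldl (stepA cf tent) s := by
  induction l generalizing s ag with
  | nil => rfl
  | cons x xs ih =>
    rw [List.foldl_cons, filterDedup]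
    by_cases hx : x ∈ ag
    · rw [if_pos hx, stepA_of_done _ _ _ _ (h x hx)]
      exact ih _ _ h
    · rw [if_neg hx, List.foldl_cons]
      refine ih _ _ ?_
      intro y hy
      rcases (PySem.Set.mem_add _ _ _).1 hy with hy' | rfl
      · exact done_mono _ _ _ _ _ (fun z hz => stepA_subset _ _ _ _ _ hz) (h y hy')
      · exact done_stepA _ _ _ _

theorem foldl_stepA_filter_tent (cf : String → PySem.Set String) (tent : PySem.Set String)
    (l : List String) (s : PySem.Set String) :
    l.foldl (stepA cf tent) s = (l.filter (fun x => decide (x ∈ tent))).foldl (stepA cf tent) s := by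
  induction l generalizing s with
  | nil => rfl
  | cons x xs ih =>
    rw [List.foldl_cons, List.filter_cons]
    by_cases hx : x ∈ tent
    · rw [if_pos (by simpa using hx), List.foldl_cons]
      exact ih _
    · rw [if_neg (by simpa using hx)]
      rw [stepA, if_neg hx]
      exact ih _

-- A's pass over the conflict-filtered remaining list is exactly grow
theorem foldl_stepA_eq_grow (cf : String → PySem.Set String) (R : PySem.Set String) (d : String)
    (hsym : ∀ x y, y ∈ cf x ↔ x ∈ cf y)
    (l : List String) (s : PySem.Set String) (hd : d ∈ s) (hl : ∀ x ∈ l, x ∈ R) :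
    (l.filter (fun x => decide (x ∉ cf d))).foldl (stepA cf (PySem.Set.diff R (cf d))) s
      = (growSk cf s l).1 := by
  induction l generalizing s with
  | nil => rfl
  | cons x xs ih =>
    rw [List.filter_cons, growSk]
    by_cases hx : x ∈ cf d
    · rw [if_neg (by simp [hx])]
      have : PySem.Set.isdisjoint (cf x) s = false :=
        (isdisjoint_false_iff _ _).2 ⟨d, (hsym x d).2 hx, hd⟩
      rw [if_neg (by simp [this])]
      exact ih s hd (fun y hy => hl y (by simp [hy]))
    · rw [if_pos (by simp [hx]), List.foldl_cons, stepA,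
        if_pos ((PySem.Set.mem_diff _ _ _).2 ⟨hl x (by simp), hx⟩)]
      by_cases hdj : PySem.Set.isdisjoint (cf x) s = true
      · rw [if_pos hdj, if_pos hdj]
        exact ih _ (by simp [PySem.Set.mem_add, hd]) (fun y hy => hl y (by simp [hy]))
      · rw [if_neg hdj, if_neg hdj]
        exact ih _ hd (fun y hy => hl y (by simp [hy]))

-- main loop equivalence
theorem fazWhile_eq (disc : List String) (cf : String → PySem.Set String)
    (hsym : ∀ x y, y ∈ cf x ↔ x ∈ cf y) :
    ∀ (fuel : Nat) (R : PySem.Set String), (∀ x ∈ R, x ∈ disc) →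
    ((filterDedup PySem.Set.empty disc).filter (fun x => decide (x ∈ R))).length ≤ fuel →
    fazWhile disc (disc.map cf) fuel R
      = ffRun cf [] ((filterDedup PySem.Set.empty disc).filter (fun x => decide (x ∈ R))) := by
  intro fuel
  induction fuel with
  | zero =>
    intro R hR hlen
    rw [List.length_eq_zero_iff.1 (Nat.le_zero.1 hlen)]
    rfl
  | succ fuel ih =>
    intro R hR hlen
    rw [fazWhile]
    by_cases hE : R.isEmpty
    · rw [if_pos hE]
      have hnil : (filterDedup PySem.Set.empty disc).filter (fun x => decide (x ∈ R)) = [] := by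
        apply List.filter_eq_nil_iff.2
        intro x hx
        simp [List.isEmpty_iff.1 hE]
      rw [hnil]
      rfl
    · rw [if_neg hE]
      have hzip : disc.zip (disc.map cf) = disc.map (fun x => (x, cf x)) := by
        have := @List.zip_map' String String (List String) id cf disc
        simpa using this
      have hfindD : disc.find? (fun x => decide (x ∈ R))
          = ((filterDedup PySem.Set.empty disc).filter (fun x => decide (x ∈ R))).head? := by
        rw [List.head?_filter]
        exact (find?_filterDedup disc _ PySem.Set.empty (by intro x hx; simp [PySem.Set.empty] at hx)).symm
      have hfind : (disc.zip (disc.map cf)).find? (fun p => decide (p.1 ∈ R))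
          = (((filterDedup PySem.Set.empty disc).filter (fun x => decide (x ∈ R))).head?).map
              (fun x => (x, cf x)) := by
        rw [hzip, List.find?_map, ← hfindD]
        rfl
      cases hM : (filterDedup PySem.Set.empty disc).filter (fun x => decide (x ∈ R)) with
      | nil =>
        rw [hM] at hfind
        rw [hfind]
        rfl
      | cons d M2 =>
        rw [hM] at hfind
        rw [hfind]
        simp only [List.head?_cons, Option.map_some]
        -- facts about d and M2
        have hMnodup : ((filterDedup PySem.Set.empty disc).filter (fun x => decide (x ∈ R))).Nodup :=
          (nodup_filterDedup disc PySem.Set.empty).filter _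
        rw [hM] at hMnodup
        have hdM2 : d ∉ M2 := (List.nodup_cons.1 hMnodup).1
        have hM2nodup : M2.Nodup := (List.nodup_cons.1 hMnodup).2
        have hMR : ∀ x ∈ d :: M2, x ∈ R := by
          intro x hx
          rw [← hM] at hx
          simpa using (List.mem_filter.1 hx).2
        have hdR : d ∈ R := hMR d (by simp)
        have hM2R : ∀ x ∈ M2, x ∈ R := fun x hx => hMR x (by simp [hx])
        -- the session fold
        have hs0d : d ∈ PySem.Set.add PySem.Set.empty d := by simp
        have hsess : (disc.zip (disc.map cf)).foldl
            (fun sess p =>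
              if p.1 ∈ PySem.Set.diff R (cf d) then
                (if PySem.Set.isdisjoint p.2 sess then PySem.Set.add sess p.1 else sess)
              else sess) (PySem.Set.add PySem.Set.empty d)
            = (growSk cf (PySem.Set.add PySem.Set.empty d) M2).1 := by
          rw [hzip, List.foldl_map]
          show disc.foldl (stepA cf (PySem.Set.diff R (cf d))) _ = _
          rw [foldl_stepA_filter_tent,
            foldl_stepA_filterDedup cf _ _ _ PySem.Set.empty
              (by intro x hx; simp [PySem.Set.empty] at hx),
            filterDedup_filter]
          have hpt : ∀ x ∈ filterDedup PySem.Set.empty disc,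
              (decide (x ∈ PySem.Set.diff R (cf d)))
                = ((fun a => decide (a ∉ cf d) && decide (a ∈ R)) x) := by
            intro x hx
            by_cases h1 : x ∈ R <;> by_cases h2 : x ∈ cf d <;>
              simp [PySem.Set.mem_diff, h1, h2]
          rw [List.filter_congr hpt, ← List.filter_filter, hM, List.filter_cons]
          by_cases hdd : d ∈ cf d
          · rw [if_neg (by simp [hdd])]
            exact foldl_stepA_eq_grow cf R d hsym M2 _ hs0d hM2R
          · rw [if_pos (by simp [hdd]), List.foldl_cons]
            have hstep : stepA cf (PySem.Set.diff R (cf d)) (PySem.Set.add PySem.Set.empty d) d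
                = PySem.Set.add PySem.Set.empty d := by
              rw [stepA, if_pos ((PySem.Set.mem_diff _ _ _).2 ⟨hdR, hdd⟩)]
              rw [if_pos ((PySem.Set.isdisjoint_iff _ _).2 ?_), PySem.Set.add_of_mem hs0d]
              intro y hy hymem
              rcases (PySem.Set.mem_add _ _ _).1 hymem with h' | rfl
              · simp [PySem.Set.empty] at h'
              · exact hdd hy
            rw [hstep]
            exact foldl_stepA_eq_grow cf R d hsym M2 _ hs0d hM2R
        rw [hsess]
        -- skipped elements of the pass
        have hM2s0 : ∀ x ∈ M2, x ∉ PySem.Set.add PySem.Set.empty d := by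
          intro x hx hmem
          rcases (PySem.Set.mem_add _ _ _).1 hmem with h' | rfl
          · simp [PySem.Set.empty] at h'
          · exact hdM2 hx
        have hsk := growSk_snd_eq_filter cf M2 (PySem.Set.add PySem.Set.empty d) hM2nodup hM2s0
        -- the next remaining set
        have hdF : d ∈ (growSk cf (PySem.Set.add PySem.Set.empty d) M2).1 :=
          grow_subset cf _ M2 d hs0d
        have hfilterR' : (filterDedup PySem.Set.empty disc).filter
              (fun x => decide (x ∈ PySem.Set.diff R (growSk cf (PySem.Set.add PySem.Set.empty d) M2).1))
            = (growSk cf (PySem.Set.add PySem.Set.empty d) M2).2 := by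
          have hpt : ∀ x ∈ filterDedup PySem.Set.empty disc,
              (decide (x ∈ PySem.Set.diff R (growSk cf (PySem.Set.add PySem.Set.empty d) M2).1))
                = ((fun a => decide (a ∉ (growSk cf (PySem.Set.add PySem.Set.empty d) M2).1)
                      && decide (a ∈ R)) x) := by
            intro x hx
            by_cases h1 : x ∈ R <;>
              by_cases h2 : x ∈ (growSk cf (PySem.Set.add PySem.Set.empty d) M2).1 <;>
              simp [PySem.Set.mem_diff, h1, h2]
          rw [List.filter_congr hpt, ← List.filter_filter, hM, List.filter_cons,
            if_neg (by simp; exact hdF), ← hsk]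
        have hlen' : ((filterDedup PySem.Set.empty disc).filter
              (fun x => decide (x ∈ PySem.Set.diff R (growSk cf (PySem.Set.add PySem.Set.empty d) M2).1))).length ≤ fuel := by
          rw [hfilterR', hsk]
          have h1 : (M2.filter (fun x => decide (x ∉ (growSk cf (PySem.Set.add PySem.Set.empty d) M2).1))).length ≤ M2.length :=
            List.length_filter_le _ _
          have h2 : (d :: M2).length ≤ fuel + 1 := hM ▸ hlen
          simp at h2
          omega
        have hR' : ∀ x ∈ PySem.Set.diff R (growSk cf (PySem.Set.add PySem.Set.empty d) M2).1, x ∈ disc := by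
          intro x hx
          exact hR x ((PySem.Set.mem_diff _ _ _).1 hx).1
        rw [ih _ hR' hlen', hfilterR']
        -- right-hand side: first-fit places d into a fresh session, then proceeds
        have hrhs : ffRun cf [] (d :: M2)
            = (growSk cf (PySem.Set.empty.add d) M2).1
                :: ffRun cf [] (growSk cf (PySem.Set.empty.add d) M2).2 := by
          show ffRun cf (ffPlace (cf d) d []) M2 = _
          exact ffRun_split cf M2 _ []
        rw [hrhs]


-- B's fold (sessions + agendadas) is ffRun over the deduplicated list
theorem bfold (turmas : List (List String)) :
    ∀ (xs : List String) (S : List (PySem.Set String)) (ag : PySem.Set String),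
    (xs.foldl (fun (st : List (PySem.Set String) × PySem.Set String) d =>
        if d ∈ st.2 then st else (ffPlace (confOf turmas d) d st.1, PySem.Set.add st.2 d)) (S, ag)).1
      = ffRun (confOf turmas) S (filterDedup ag xs) := by
  intro xs
  induction xs with
  | nil => intro S ag; rfl
  | cons x xs ih =>
    intro S ag
    rw [List.foldl_cons, filterDedup]
    by_cases hx : x ∈ ag
    · rw [if_pos hx, if_pos hx]
      exact ih S ag
    · rw [if_neg hx, if_neg hx]
      exact ih _ _

-- ===== VERDICT (by name: the statement is the Claim_ definition above) =====
theorem faz_horario_escolar_spec : Claim_equal_faz_horario_escolar := by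
  unfold Claim_equal_faz_horario_escolar
  intro disc matr _hdom
  unfold Spec_faz_horario_escolar faz_horario_escolar faz_horario_escolar_alt
  simp only
  -- the conflict lists of A are the pointwise conflict sets of B
  rw [conflitos_map ((PySem.Dict.ofList matr).keys) (fun a => PySem.Dict.getD (PySem.Dict.ofList matr) a []) disc
      (fun _ => PySem.Set.empty)]
  have hcf : (fun nm => ((PySem.Dict.ofList matr).keys).foldl
        (fun acc a => if nm ∈ PySem.Dict.getD (PySem.Dict.ofList matr) a [] then
            PySem.Set.union acc (PySem.Dict.getD (PySem.Dict.ofList matr) a []) else acc)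
        PySem.Set.empty)
      = (fun nm => confOf ((PySem.Dict.ofList matr).values) nm) := by
    funext nm
    exact conf_keys_eq_confOf (PySem.Dict.ofList matr) (PySem.Dict.nodup_keys_ofList matr) nm
  rw [hcf]
  rw [fazWhile_eq disc (confOf ((PySem.Dict.ofList matr).values))
      (fun x y => confOf_symm _ x y) disc.length (PySem.Set.ofList disc)
      (fun x hx => (PySem.Set.mem_ofList disc x).1 hx)
      (le_trans (List.length_filter_le _ _) (length_filterDedup_le disc PySem.Set.empty))]
  rw [List.filter_eq_self.2 (fun x hx => by
      simp only [decide_eq_true_eq]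
      exact (PySem.Set.mem_ofList disc x).2 ((mem_filterDedup disc PySem.Set.empty x).1 hx).1)]
  exact (bfold ((PySem.Dict.ofList matr).values) disc [] PySem.Set.empty).symm
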